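-- pv_equiv track=rewrite | github.com/andra2602/LFA | 132_ANDRUTA-ANDRA-MIHAELA_1_2.py | d_tilda
-- ===== SOURCE A (Python) =====
-- def delta(q, a, d):
--     if q in d:
--         if a in d[q]:
--             return d[q][a]
--     return []
--
-- def d_tilda(q, w, d): # aici q nu mai e doar o stare,e o multime de stari
--     if len(w) == 0:
--         return q # <q>
--     stari_noi = set()
--     for st in q:
--         # sts = <st>
--         # for st in sts;
--         tranzitie = delta(st, w[0], d)
--         if tranzitie:
--             stari_noi.update(tranzitie) # <tranzitie>
--     if not stari_noi:
--         return set()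
--     return d_tilda(stari_noi, w[1:], d)
-- ===== SOURCE B (Python) =====
-- def d_tilda(q, w, d):
--     # iterative: one pass over the word; empty state sets stay empty under the
--     # comprehension, so A's recursion and its empty-set early exit are not needed.
--     current = q
--     for a in w:
--         current = {t for st in current for t in d.get(st, {}).get(a, [])}
--     return current
-- ===== Notes on version B (the rewrite author's own statement) =====
-- stated objective: simpler
-- what changed: Replaced A's recursion over the word (with an explicit delta helper and an empty-set early-exit return) by a single iterative loop that rebuilds the current state set per symbol with one set comprehension over chained dict.get defaults; the early exit disappears because an empty set stays empty.
import Mathlib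
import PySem

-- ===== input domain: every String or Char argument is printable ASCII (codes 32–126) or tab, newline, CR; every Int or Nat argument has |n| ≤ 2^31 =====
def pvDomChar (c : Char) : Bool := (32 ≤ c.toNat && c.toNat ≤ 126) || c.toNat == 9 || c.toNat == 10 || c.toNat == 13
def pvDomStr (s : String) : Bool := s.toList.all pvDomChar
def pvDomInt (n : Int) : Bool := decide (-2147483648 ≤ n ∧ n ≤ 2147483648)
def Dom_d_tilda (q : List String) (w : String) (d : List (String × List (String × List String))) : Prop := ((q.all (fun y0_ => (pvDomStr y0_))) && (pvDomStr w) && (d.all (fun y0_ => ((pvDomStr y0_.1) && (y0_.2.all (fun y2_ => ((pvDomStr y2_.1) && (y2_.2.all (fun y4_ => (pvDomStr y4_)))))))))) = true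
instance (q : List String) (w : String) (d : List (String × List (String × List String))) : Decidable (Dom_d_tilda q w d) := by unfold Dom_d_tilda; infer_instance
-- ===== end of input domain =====

-- B replaces A's recursion over the word (delta helper + empty-set early exit)
-- by a single iterative loop (a fold over the word) with a chained-default dict
-- lookup per symbol (objective: simpler). Return-value equivalence only.

-- ===== PORT A =====
-- delta helper of A: nested dict membership tests, [] when either key is missing
def deltaA (st a : String) (d : List (String × List (String × List String))) : List String :=
  match (PySem.Dict.mk d).get? st with
  | some inner =>
    match (PySem.Dict.mk inner).get? a with
    | some v => v
    | none => []
  | none => []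

-- A's recursion over the word (w as List Char; w[0] is the 1-char string, w[1:] the tail)
def dTildaAuxA (q : List String) (w : List Char) (d : List (String × List (String × List String))) : List String :=
  match w with
  | [] => q
  | c :: rest =>
    let stariNoi := q.foldl (fun acc st =>
        let tr := deltaA st (String.ofList [c]) d
        if tr.isEmpty then acc else PySem.Set.update acc tr) PySem.Set.empty
    if stariNoi.isEmpty then [] else dTildaAuxA stariNoi rest d

def d_tilda (q : List String) (w : String) (d : List (String × List (String × List String))) : List String :=
  dTildaAuxA q w.toList d

-- ===== PORT B =====
-- the set comprehension {t for st in cur for t in d.get(st, {}).get(a, [])}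
def stepB (cur : List String) (a : String) (d : List (String × List (String × List String))) : List String :=
  PySem.Set.ofList (cur.flatMap (fun st =>
    (PySem.Dict.mk ((PySem.Dict.mk d).getD st [])).getD a []))

-- B's loop: current = q; for a in w: current = stepB current a d; return current
def d_tilda_alt (q : List String) (w : String) (d : List (String × List (String × List String))) : List String :=
  w.toList.foldl (fun cur c => stepB cur (String.ofList [c]) d) q

-- ===== PRECONDITION & SPEC =====
def Spec_d_tilda (q : List String) (w : String) (d : List (String × List (String × List String))) (out : List String) : Prop := out = d_tilda_alt q w d
instance (q : List String) (w : String) (d : List (String × List (String × List String))) (out : List String) : Decidable (Spec_d_tilda q w d out) := by unfold Spec_d_tilda; infer_instance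

-- ===== CLAIM (what is proved, stated in full; the proofs are below) =====
def Claim_equal_d_tilda : Prop := ∀ (q : List String) (w : String) (d : List (String × List (String × List String))), Dom_d_tilda q w d → Spec_d_tilda q w d (d_tilda q w d)

-- ===== LEMMAS AND PROOFS =====

-- A's delta equals B's chained-default lookup
theorem deltaA_eq_getD (st a : String) (d : List (String × List (String × List String))) :
    deltaA st a d
      = (PySem.Dict.mk ((PySem.Dict.mk d).getD st [])).getD a [] := by
  unfold deltaA PySem.Dict.getD
  cases (PySem.Dict.mk d).get? st with
  | none => rfl
  | some inner =>
    simp only [Option.getD_some]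
    cases (PySem.Dict.mk inner).get? a <;> rfl

-- A's inner loop (skip empty transitions, update the accumulator set) equals one
-- Set.update with the flatMap of all transitions.
theorem stepA_eq_update (a : String) (d : List (String × List (String × List String)))
    (q : List String) (s : PySem.Set String) :
    q.foldl (fun acc st =>
        let tr := deltaA st a d
        if tr.isEmpty then acc else PySem.Set.update acc tr) s
      = PySem.Set.update s (q.flatMap (fun st => deltaA st a d)) := by
  induction q generalizing s with
  | nil => simp [PySem.Set.update]
  | cons st q ih =>
    simp only [List.foldl_cons, List.flatMap_cons]
    rw [ih, PySem.Set.update_append]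
    by_cases h : (deltaA st a d).isEmpty
    · have he : deltaA st a d = [] := by simpa [List.isEmpty_iff] using h
      simp [he, PySem.Set.update]
    · simp [h]

-- A's per-symbol step equals B's set comprehension step
theorem stepA_eq_stepB (a : String) (d : List (String × List (String × List String)))
    (q : List String) :
    (q.foldl (fun acc st =>
        let tr := deltaA st a d
        if tr.isEmpty then acc else PySem.Set.update acc tr) PySem.Set.empty)
      = stepB q a d := by
  rw [stepA_eq_update]
  unfold stepB
  simp only [fun st => deltaA_eq_getD st a d]
  rfl

theorem stepB_nil (a : String) (d : List (String × List (String × List String))) :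
    stepB [] a d = [] := rfl

theorem foldl_stepB_nil (w : List Char) (d : List (String × List (String × List String))) :
    w.foldl (fun cur c => stepB cur (String.ofList [c]) d) [] = [] := by
  induction w with
  | nil => rfl
  | cons c rest ih => simpa [stepB_nil] using ih

-- A equals the left fold of stepB over the word
theorem auxA_eq_foldl (w : List Char) (q : List String)
    (d : List (String × List (String × List String))) :
    dTildaAuxA q w d = w.foldl (fun cur c => stepB cur (String.ofList [c]) d) q := by
  induction w generalizing q with
  | nil => rfl
  | cons c rest ih =>
    rw [dTildaAuxA, List.foldl_cons, stepA_eq_stepB]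
    by_cases h : (stepB q (String.ofList [c]) d).isEmpty
    · have he : stepB q (String.ofList [c]) d = [] := by simpa [List.isEmpty_iff] using h
      simp [he, foldl_stepB_nil]
    · simp [h, ih]

-- ===== VERDICT (by name: the statement is the Claim_ definition above) =====
theorem d_tilda_spec : Claim_equal_d_tilda := by
  intro q w d _
  show d_tilda q w d = d_tilda_alt q w d
  rw [d_tilda, d_tilda_alt, auxA_eq_foldl]
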